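-- pv_equiv track=rewrite | github.com/sameer6699/HackerRank-Solved-Questions | Project_Eluar#9/problem_9.py | find_max_pythagorean_triplet_product
-- ===== SOURCE A (Python) =====
-- def find_max_pythagorean_triplet_product(n):
--     max_product = -1
--     for a in range(1, n // 3):
--         # Calculate b and c
--         b = (n * (n - 2 * a)) // (2 * (n - a))
--         c = n - a - b
--         if a * a + b * b == c * c:
--             product = a * b * c
--             if product > max_product:
--                 max_product = product
--     return max_product
-- ===== SOURCE B (Python) =====
-- def find_max_pythagorean_triplet_product(n):
--     # A Pythagorean triple a+b+c=n satisfies 2*(n-a)*(n-b) = n*n, so triples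
--     # correspond to factorizations n*n = 2*d*e; enumerate the cofactor e = n-b,
--     # which lies strictly between n/2 and 3n/4 (a quarter-length window).
--     best = -1
--     for e in range(n // 2 + 1, (3 * n + 3) // 4):
--         if (n * n) % (2 * e) == 0:
--             d = (n * n) // (2 * e)
--             a = n - d
--             if 1 <= a < n // 3:
--                 p = a * (n - e) * (d + e - n)
--                 if p > best:
--                     best = p
--     return best
-- ===== Notes on version B (the rewrite author's own statement) =====
-- stated objective: faster
-- what changed: Instead of scanning every a in [1, n//3) and testing a^2+b^2=c^2 with a floor-divided b, B uses the factorization identity n^2 = 2*(n-a)*(n-b) and scans only the cofactor e = n-b over the quarter-length window (n/2, 3n/4), keeping e with 2e | n^2 whose recovered a lies in A's range.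
import Mathlib
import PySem

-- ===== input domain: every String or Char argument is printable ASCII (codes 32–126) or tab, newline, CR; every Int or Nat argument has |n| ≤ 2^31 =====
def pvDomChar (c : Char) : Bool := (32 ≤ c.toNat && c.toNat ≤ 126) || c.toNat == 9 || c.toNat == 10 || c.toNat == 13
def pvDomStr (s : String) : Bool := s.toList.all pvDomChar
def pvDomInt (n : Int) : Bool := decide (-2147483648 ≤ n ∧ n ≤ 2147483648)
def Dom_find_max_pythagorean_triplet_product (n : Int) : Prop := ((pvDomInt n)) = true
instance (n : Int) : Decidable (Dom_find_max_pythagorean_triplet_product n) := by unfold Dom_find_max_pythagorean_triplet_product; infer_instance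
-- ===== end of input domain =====

-- B replaces A's full scan of a in [1, n//3) (floor-divided b, square test) by the
-- factorization identity n^2 = 2*(n-a)*(n-b): it scans only the cofactor e = n-b over
-- the quarter-length window (n/2, 3n/4) and keeps divisors of n^2 (alternative scan).

-- ===== PORT A =====
def find_max_pythagorean_triplet_product (n : Int) : Int :=
  (PySem.List.pyRange 1 (PySem.Int.floordiv n 3) 1).foldl
    (fun max_product a =>
      let b := PySem.Int.floordiv (n * (n - 2 * a)) (2 * (n - a))
      let c := n - a - b
      if a * a + b * b == c * c then
        let product := a * b * c
        if product > max_product then product else max_product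
      else max_product)
    (-1)

-- ===== PORT B =====
def find_max_pythagorean_triplet_product_alt (n : Int) : Int :=
  (PySem.List.pyRange (PySem.Int.floordiv n 2 + 1) (PySem.Int.floordiv (3 * n + 3) 4) 1).foldl
    (fun best e =>
      if PySem.Int.mod (n * n) (2 * e) == 0 then
        let d := PySem.Int.floordiv (n * n) (2 * e)
        let a := n - d
        if 1 ≤ a ∧ a < PySem.Int.floordiv n 3 then
          let p := a * (n - e) * (d + e - n)
          if p > best then p else best
        else best
      else best)
    (-1)

-- ===== PRECONDITION & SPEC =====
def Spec_find_max_pythagorean_triplet_product (n : Int) (out : Int) : Prop := out = find_max_pythagorean_triplet_product_alt n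
instance (n : Int) (out : Int) : Decidable (Spec_find_max_pythagorean_triplet_product n out) := by unfold Spec_find_max_pythagorean_triplet_product; infer_instance

-- ===== CLAIM (what is proved, stated in full; the proofs are below) =====
def Claim_equal_find_max_pythagorean_triplet_product : Prop := ∀ (n : Int), Dom_find_max_pythagorean_triplet_product n → Spec_find_max_pythagorean_triplet_product n (find_max_pythagorean_triplet_product n)

-- ===== LEMMAS AND PROOFS =====

-- A's per-iteration test and product, as standalone functions
def pvA_cond (n a : Int) : Bool :=
  let b := PySem.Int.floordiv (n * (n - 2 * a)) (2 * (n - a))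
  let c := n - a - b
  a * a + b * b == c * c

def pvA_val (n a : Int) : Int :=
  let b := PySem.Int.floordiv (n * (n - 2 * a)) (2 * (n - a))
  a * b * (n - a - b)

-- B's per-iteration test and product
def pvB_cond (n e : Int) : Bool :=
  (PySem.Int.mod (n * n) (2 * e) == 0) &&
    decide (1 ≤ n - PySem.Int.floordiv (n * n) (2 * e) ∧
            n - PySem.Int.floordiv (n * n) (2 * e) < PySem.Int.floordiv n 3)

def pvB_val (n e : Int) : Int :=
  let d := PySem.Int.floordiv (n * n) (2 * e)
  (n - d) * (n - e) * (d + e - n)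

-- the divisor cofactor attached to a valid leg a
def pvPhi (n a : Int) : Int := PySem.Int.floordiv (n * n) (2 * (n - a))

-- accumulating "if better then replace" over a filtered list is foldl max over the mapped filter
lemma pv_foldl_shape (p : Int → Bool) (f : Int → Int) (l : List Int) (i : Int) :
    l.foldl (fun m x => if p x then (if f x > m then f x else m) else m) i
      = ((l.filter p).map f).foldl max i := by
  induction l generalizing i with
  | nil => rfl
  | cons x t ih =>
    by_cases hp : p x
    · have hmax : (if f x > i then f x else i) = max i (f x) := by
        rw [max_def]; split_ifs <;> omega
      simp [hp, hmax, ih]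
    · simp [hp, ih]

-- same, with a two-level condition as in B's body
lemma pv_foldl_shape2 (q : Int → Bool) (g : Int → Prop) [DecidablePred g]
    (f : Int → Int) (l : List Int) (i : Int) :
    l.foldl (fun m x => if q x then (if g x then (if f x > m then f x else m) else m) else m) i
      = ((l.filter (fun x => q x && decide (g x))).map f).foldl max i := by
  induction l generalizing i with
  | nil => rfl
  | cons x t ih =>
    by_cases hq : q x
    · by_cases hg : g x
      · have hmax : (if f x > i then f x else i) = max i (f x) := by
          rw [max_def]; split_ifs <;> omega
        simp [hq, hg, hmax, ih]
      · simp [hq, hg, ih]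
    · simp [hq, ih]

lemma pvA_eq (n : Int) :
    find_max_pythagorean_triplet_product n
      = (((PySem.List.pyRange 1 (PySem.Int.floordiv n 3) 1).filter (pvA_cond n)).map (pvA_val n)).foldl max (-1) := by
  exact pv_foldl_shape (pvA_cond n) (pvA_val n) _ (-1)

lemma pvB_eq (n : Int) :
    find_max_pythagorean_triplet_product_alt n
      = (((PySem.List.pyRange (PySem.Int.floordiv n 2 + 1) (PySem.Int.floordiv (3 * n + 3) 4) 1).filter (pvB_cond n)).map (pvB_val n)).foldl max (-1) := by
  exact pv_foldl_shape2
    (fun e => PySem.Int.mod (n * n) (2 * e) == 0)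
    (fun e => 1 ≤ n - PySem.Int.floordiv (n * n) (2 * e) ∧
              n - PySem.Int.floordiv (n * n) (2 * e) < PySem.Int.floordiv n 3)
    (pvB_val n) _ (-1)

-- exact division computes the cofactor
lemma pv_fdiv_exact {a b q : Int} (hb : 0 < b) (h : a = b * q) :
    PySem.Int.floordiv a b = q := by
  rw [PySem.Int.floordiv_eq_iff_of_pos hb]
  constructor <;> nlinarith

lemma pv_fdiv_bounds (a b : Int) (hb : 0 < b) :
    PySem.Int.floordiv a b * b ≤ a ∧ a < PySem.Int.floordiv a b * b + b := by
  have h := PySem.Int.floordiv_mul_add_mod a b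
  have h1 := PySem.Int.mod_nonneg a hb
  have h2 := PySem.Int.mod_lt a hb
  omega

-- the workhorse, A-side: every valid a yields a valid cofactor e = pvPhi n a
lemma pv_keyA (n a : Int) (h1 : 1 ≤ a) (h2 : a < PySem.Int.floordiv n 3)
    (hp : pvA_cond n a = true) :
    2 * (n - a) * pvPhi n a = n * n ∧
    PySem.Int.floordiv n 2 + 1 ≤ pvPhi n a ∧
    pvPhi n a < PySem.Int.floordiv (3 * n + 3) 4 ∧
    pvB_cond n (pvPhi n a) = true ∧
    pvB_val n (pvPhi n a) = pvA_val n a := by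
  have ht3 := pv_fdiv_bounds n 3 (by norm_num)
  have hn6 : 6 ≤ n := by omega
  have hD : 0 < 2 * (n - a) := by omega
  simp only [pvA_cond, beq_iff_eq] at hp
  set b := PySem.Int.floordiv (n * (n - 2 * a)) (2 * (n - a)) with hb
  -- hp : a * a + b * b = (n - a - b) * (n - a - b); this forces the division exact
  have key : 2 * b * (n - a) = n * (n - 2 * a) := by linear_combination hp
  have hnn : n * n = 2 * (n - a) * (n - b) := by linear_combination key
  have he : pvPhi n a = n - b := pv_fdiv_exact hD hnn
  have hid1 : 2 * (n - a) * (2 * (n - b) - n) = 2 * n * a := by linear_combination -2 * key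
  have hlo' : 0 < 2 * (n - b) - n := by
    by_contra hcon
    push Not at hcon
    nlinarith [mul_nonpos_of_nonneg_of_nonpos hD.le hcon]
  have hid2 : 2 * (n - a) * (3 * n - 4 * (n - b)) = 2 * n * (n - 3 * a) := by
    linear_combination 4 * key
  have hhi' : 0 < 3 * n - 4 * (n - b) := by
    by_contra hcon
    push Not at hcon
    nlinarith [mul_nonpos_of_nonneg_of_nonpos hD.le hcon,
      mul_pos (show (0:Int) < 2 * n by omega) (show (0:Int) < n - 3 * a by omega)]
  have ht2 := pv_fdiv_bounds n 2 (by norm_num)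
  have ht4 := pv_fdiv_bounds (3 * n + 3) 4 (by norm_num)
  have h2e : 0 < 2 * (n - b) := by omega
  have hnn2 : n * n = 2 * (n - b) * (n - a) := by linear_combination hnn
  have hd : PySem.Int.floordiv (n * n) (2 * (n - b)) = n - a := pv_fdiv_exact h2e hnn2
  refine ⟨?_, ?_, ?_, ?_, ?_⟩
  · rw [he]; linear_combination -hnn
  · rw [he]; omega
  · rw [he]; omega
  · rw [he]
    simp only [pvB_cond, hd, Bool.and_eq_true, beq_iff_eq, decide_eq_true_eq]
    refine ⟨?_, by omega, by omega⟩
    rw [PySem.Int.mod_eq_zero_iff_dvd]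
    exact ⟨n - a, hnn2⟩
  · rw [he]
    simp only [pvB_val, pvA_val, hd, ← hb]
    ring

-- the workhorse, B-side: every valid cofactor e comes from a valid a
lemma pv_keyB (n e : Int) (he1 : PySem.Int.floordiv n 2 + 1 ≤ e)
    (_he2 : e < PySem.Int.floordiv (3 * n + 3) 4) (hp : pvB_cond n e = true) :
    1 ≤ n - PySem.Int.floordiv (n * n) (2 * e) ∧
    n - PySem.Int.floordiv (n * n) (2 * e) < PySem.Int.floordiv n 3 ∧
    pvA_cond n (n - PySem.Int.floordiv (n * n) (2 * e)) = true ∧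
    pvPhi n (n - PySem.Int.floordiv (n * n) (2 * e)) = e := by
  have ht3 := pv_fdiv_bounds n 3 (by norm_num)
  have ht2 := pv_fdiv_bounds n 2 (by norm_num)
  simp only [pvB_cond, Bool.and_eq_true, beq_iff_eq, decide_eq_true_eq] at hp
  obtain ⟨hdvd, hg1, hg2⟩ := hp
  have hn6 : 6 ≤ n := by omega
  have he0 : 0 < 2 * e := by omega
  rw [PySem.Int.mod_eq_zero_iff_dvd] at hdvd
  obtain ⟨k, hk⟩ := hdvd
  have hdk : PySem.Int.floordiv (n * n) (2 * e) = k := pv_fdiv_exact he0 hk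
  rw [hdk] at hg1 hg2 ⊢
  have hDpos : 0 < 2 * (n - (n - k)) := by omega
  have hbE : PySem.Int.floordiv (n * (n - 2 * (n - k))) (2 * (n - (n - k))) = n - e := by
    apply pv_fdiv_exact hDpos
    linear_combination -hk
  refine ⟨hg1, hg2, ?_, ?_⟩
  · simp only [pvA_cond, beq_iff_eq, hbE]
    linear_combination hk
  · exact pv_fdiv_exact hDpos (by linear_combination hk)

lemma pv_mem (n x : Int) :
    x ∈ (((PySem.List.pyRange 1 (PySem.Int.floordiv n 3) 1).filter (pvA_cond n)).map (pvPhi n))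
      ↔ x ∈ ((PySem.List.pyRange (PySem.Int.floordiv n 2 + 1) (PySem.Int.floordiv (3 * n + 3) 4) 1).filter (pvB_cond n)) := by
  simp only [List.mem_map, List.mem_filter, PySem.List.mem_pyRange_one]
  constructor
  · rintro ⟨a, ⟨⟨ha1, ha2⟩, hp⟩, rfl⟩
    obtain ⟨-, hlo, hhi, hcond, -⟩ := pv_keyA n a ha1 ha2 hp
    exact ⟨⟨hlo, hhi⟩, hcond⟩
  · rintro ⟨⟨hlo, hhi⟩, hp⟩
    obtain ⟨g1, g2, hpa, hphi⟩ := pv_keyB n x hlo hhi hp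
    exact ⟨n - PySem.Int.floordiv (n * n) (2 * x), ⟨⟨g1, g2⟩, hpa⟩, hphi⟩

lemma pv_inj (n : Int) :
    ∀ a1 ∈ (PySem.List.pyRange 1 (PySem.Int.floordiv n 3) 1).filter (pvA_cond n),
    ∀ a2 ∈ (PySem.List.pyRange 1 (PySem.Int.floordiv n 3) 1).filter (pvA_cond n),
    pvPhi n a1 = pvPhi n a2 → a1 = a2 := by
  intro a1 hm1 a2 hm2 hphi
  simp only [List.mem_filter, PySem.List.mem_pyRange_one] at hm1 hm2
  obtain ⟨⟨ha11, ha12⟩, hpa1⟩ := hm1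
  obtain ⟨⟨ha21, ha22⟩, hpa2⟩ := hm2
  obtain ⟨e1, -, -, -, -⟩ := pv_keyA n a1 ha11 ha12 hpa1
  obtain ⟨e2, lo2, -, -, -⟩ := pv_keyA n a2 ha21 ha22 hpa2
  -- pvPhi n a2 is positive (n ≥ 6 on a nonempty range), so cancel it
  have hn6 : 6 ≤ n := by
    have := pv_fdiv_bounds n 3 (by norm_num)
    omega
  have ht2 := pv_fdiv_bounds n 2 (by norm_num)
  rw [hphi] at e1
  have := mul_right_cancel₀ (show pvPhi n a2 ≠ 0 by omega) (e1.trans e2.symm)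
  omega

lemma pv_perm (n : Int) :
    (((PySem.List.pyRange 1 (PySem.Int.floordiv n 3) 1).filter (pvA_cond n)).map (pvPhi n)).Perm
      ((PySem.List.pyRange (PySem.Int.floordiv n 2 + 1) (PySem.Int.floordiv (3 * n + 3) 4) 1).filter (pvB_cond n)) := by
  apply (List.perm_ext_iff_of_nodup ?_ ?_).mpr (fun x => pv_mem n x)
  · exact ((PySem.List.nodup_pyRange_one 1 (PySem.Int.floordiv n 3)).filter _).map_on (pv_inj n)
  · exact (PySem.List.nodup_pyRange_one _ _).filter _

lemma pv_map_val (n : Int) :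
    ((PySem.List.pyRange 1 (PySem.Int.floordiv n 3) 1).filter (pvA_cond n)).map (pvA_val n)
      = ((((PySem.List.pyRange 1 (PySem.Int.floordiv n 3) 1).filter (pvA_cond n)).map (pvPhi n)).map (pvB_val n)) := by
  rw [List.map_map]
  apply List.map_congr_left
  intro a ha
  simp only [List.mem_filter, PySem.List.mem_pyRange_one] at ha
  obtain ⟨-, -, -, -, hval⟩ := pv_keyA n a ha.1.1 ha.1.2 ha.2
  exact hval.symm

-- ===== VERDICT (by name: the statement is the Claim_ definition above) =====
theorem find_max_pythagorean_triplet_product_spec : Claim_equal_find_max_pythagorean_triplet_product := by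
  intro n _
  unfold Spec_find_max_pythagorean_triplet_product
  rw [pvA_eq, pvB_eq, pv_map_val]
  exact ((pv_perm n).map (pvB_val n)).foldl_eq' (fun x _ y _ z => max_right_comm z x y) (-1)
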